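-- pv_equiv track=rewrite | github.com/ivncd/ConcursoAoC2023 | Day14/code_part1.py | transformY
-- ===== SOURCE A (Python) =====
-- def transformY(rows : list, inverse : bool = False) -> list:
--     newArray = rows[:] # Copied array
--     for columnId in range(len(newArray[0])):
--         lastEmptyPosition = 0 if not inverse else len(newArray) - 1
--         for rowId in range(len(newArray)):
--             rowId = rowId if not inverse else len(newArray) - 1 - rowId
--             if newArray[rowId][columnId] == '#':
--                 lastEmptyPosition = rowId + 1 if not inverse else rowId - 1
--
--             elif newArray[rowId][columnId] == 'O' and (lastEmptyPosition < len(newArray) - 1 if not inverse else lastEmptyPosition > 0):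
--                 newArray[rowId][columnId] = '.'
--                 newArray[lastEmptyPosition][columnId] = 'O'
--                 lastEmptyPosition += 1 if not inverse else -1
--
--     return newArray
-- ===== SOURCE B (Python) =====
-- # Run-splitting tilt: per column, split into '#'-bounded runs, count rocks per run and
-- # pack them toward the tilt side (writing back into the existing inner row lists, like A,
-- # and returning a shallow copy). Objective: simpler decomposition, not faster.
-- def transformY(rows: list, inverse: bool = False) -> list:
--     n = len(rows)
--     for j in range(len(rows[0])):
--         col = [row[j] for row in rows]
--         if inverse:
--             col.reverse()
--         parts = []
--         cur = []
--         for v in col: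
--             if v == '#':
--                 parts.append(cur)
--                 cur = []
--             else:
--                 cur.append(v)
--         parts.append(cur)
--         out = []
--         for idx, p in enumerate(parts):
--             if idx > 0:
--                 out.append('#')
--             k = p.count('O')
--             out.extend(['O'] * k)
--             out.extend('.' if v == 'O' else v for v in p[k:])
--         if inverse:
--             out.reverse()
--         for i in range(n):
--             rows[i][j] = out[i]
--     return rows[:]
-- ===== Notes on version B (the rewrite author's own statement) =====
-- stated objective: alternative
-- what changed: Replaces A's stateful last-empty-position pointer simulation over row indices with a per-column run decomposition: each column is split into '#'-bounded runs, the 'O' rocks in each run are counted and packed toward the tilt side, and the inverse direction is handled by reversing the column.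
import Mathlib
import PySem

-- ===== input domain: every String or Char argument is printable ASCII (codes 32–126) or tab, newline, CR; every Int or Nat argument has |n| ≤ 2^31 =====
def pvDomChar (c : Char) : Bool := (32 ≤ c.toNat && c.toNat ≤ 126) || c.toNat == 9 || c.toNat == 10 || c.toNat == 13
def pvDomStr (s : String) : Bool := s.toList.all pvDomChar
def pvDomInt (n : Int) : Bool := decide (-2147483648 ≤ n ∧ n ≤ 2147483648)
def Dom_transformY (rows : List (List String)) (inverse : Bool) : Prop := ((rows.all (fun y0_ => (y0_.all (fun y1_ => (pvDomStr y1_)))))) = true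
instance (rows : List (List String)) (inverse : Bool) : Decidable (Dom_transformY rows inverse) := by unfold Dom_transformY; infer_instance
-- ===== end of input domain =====

-- B re-implements the tilt by splitting each column into '#'-bounded runs and packing the
-- 'O' rocks toward the tilt side (A simulates a moving last-empty-position pointer instead).
-- A and B both mutate the inner row lists in place in Python; the equivalence proved here is
-- about the returned value.

-- ===== PORT A =====
-- newArray[rowId][columnId]  (defaults unreachable under Pre_)
def pvGet2 (g : List (List String)) (i j : Int) : String :=
  PySem.List.pyGetD (PySem.List.pyGetD g i []) j ""

-- newArray[rowId][columnId] = v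
def pvSet2 (g : List (List String)) (i j : Int) (v : String) : List (List String) :=
  PySem.List.pySetD g i (PySem.List.pySetD (PySem.List.pyGetD g i []) j v)

-- the body of A's inner 'for rowId in range(len(newArray))' loop; state = (newArray, lastEmptyPosition)
def pvStep (inverse : Bool) (columnId : Int) (st : List (List String) × Int)
    (rowId0 : Int) : List (List String) × Int :=
  let arr := st.1
  let le := st.2
  let n : Int := (arr.length : Int)
  let rowId : Int := if !inverse then rowId0 else n - 1 - rowId0
  if pvGet2 arr rowId columnId = "#" then
    (arr, if !inverse then rowId + 1 else rowId - 1)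
  else if pvGet2 arr rowId columnId = "O" ∧ (if !inverse then le < n - 1 else le > 0) then
    (pvSet2 (pvSet2 arr rowId columnId ".") le columnId "O", le + (if !inverse then 1 else -1))
  else
    st

def pvInner (inverse : Bool) (g : List (List String)) (columnId : Int) : List (List String) :=
  ((PySem.List.pyRange 0 (g.length : Int) 1).foldl (pvStep inverse columnId)
    (g, if !inverse then (0 : Int) else (g.length : Int) - 1)).1

def transformY (rows : List (List String)) (inverse : Bool) : List (List String) :=
  (PySem.List.pyRange 0 ((PySem.List.pyGetD rows 0 []).length : Int) 1).foldl
    (pvInner inverse) rows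

-- ===== PORT B =====
-- pack(p): k = p.count('O'); ['O']*k + ['.' if v == 'O' else v for v in p[k:]]
def tiltRun (p : List String) : List String :=
  let k := PySem.List.count p "O"
  List.replicate k "O" ++ (p.drop k).map (fun v => if v = "O" then "." else v)

-- body of B's run-splitting loop; state = (done, cur)
def splitStep (s : List (List String) × List String) (v : String) :
    List (List String) × List String :=
  if v = "#" then (s.1 ++ [s.2], []) else (s.1, s.2 ++ [v])

def splitHash (col : List String) : List (List String) :=
  let st := col.foldl splitStep ([], [])
  st.1 ++ [st.2]

-- out = list(pack(parts[0])); for p in parts[1:]: out.append('#'); out.extend(pack(p))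
def joinRuns : List (List String) → List String
  | [] => []
  | p :: ps => ps.foldl (fun out q => out ++ "#" :: tiltRun q) (tiltRun p)

def tiltColFwd (col : List String) : List String := joinRuns (splitHash col)

def tiltCol (col : List String) (inverse : Bool) : List String :=
  if inverse then (tiltColFwd col.reverse).reverse else tiltColFwd col

-- col = [row[j] for row in rows]
def getColumn (j : Nat) (g : List (List String)) : List String :=
  g.map (fun row => row.getD j "")

-- for i in range(n): rows[i][j] = out[i]   (|out| = n throughout)
def writeCol (g : List (List String)) (j : Nat) (out : List String) : List (List String) :=
  List.zipWith (fun row v => row.set j v) g out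

def transformY_alt (rows : List (List String)) (inverse : Bool) : List (List String) :=
  (List.range (rows.headD []).length).foldl
    (fun g j => writeCol g j (tiltCol (getColumn j g) inverse)) rows

-- ===== PRECONDITION & SPEC =====
-- A raises IndexError exactly on an empty grid or when some row is shorter than the
-- first row; Pre_ excludes exactly those crashing inputs (B raises there as well).
def Pre_transformY (rows : List (List String)) (inverse : Bool) : Prop :=
  rows ≠ [] ∧ ∀ r ∈ rows, (rows.headD []).length ≤ r.length
instance (rows : List (List String)) (inverse : Bool) : Decidable (Pre_transformY rows inverse) := by
  unfold Pre_transformY; infer_instance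

def pvWitness_transformY : List (List String) × Bool := ([["O", "."], [".", "#"]], false)

def Spec_transformY (rows : List (List String)) (inverse : Bool) (out : List (List String)) : Prop :=
  out = transformY_alt rows inverse
instance (rows : List (List String)) (inverse : Bool) (out : List (List String)) :
    Decidable (Spec_transformY rows inverse out) := by unfold Spec_transformY; infer_instance

-- ===== CLAIM (what is proved, stated in full; the proofs are below) =====
def Claim_equal_transformY : Prop := ∀ (rows : List (List String)) (inverse : Bool),
  Dom_transformY rows inverse → Pre_transformY rows inverse →
    Spec_transformY rows inverse (transformY rows inverse)

-- ===== LEMMAS AND PROOFS =====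

theorem count_le_length (p : List String) : PySem.List.count p "O" ≤ p.length := by
  rw [PySem.List.count_eq]
  exact List.count_le_length

theorem tiltRun_length (p : List String) : (tiltRun p).length = p.length := by
  have h := count_le_length p
  rw [PySem.List.count_eq] at h
  simp [tiltRun]
  omega

-- flattening of the already-completed runs, each followed by its closing '#'
def runsJ (qs : List (List String)) : List String :=
  qs.flatMap (fun q => tiltRun q ++ ["#"])

theorem runsJ_snoc (qs : List (List String)) (q : List String) :
    runsJ (qs ++ [q]) = runsJ qs ++ tiltRun q ++ ["#"] := by
  simp [runsJ]

theorem shift_hash (t : List (List String)) (z : List String) :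
    t.flatMap (fun q => "#" :: tiltRun q) ++ "#" :: z
      = "#" :: (t.flatMap (fun q => tiltRun q ++ ["#"]) ++ z) := by
  induction t with
  | nil => simp
  | cons q t ih => simp only [List.flatMap_cons, List.append_assoc, List.cons_append, ih]; simp

theorem joinRuns_snoc (qs : List (List String)) (lr : List String) :
    joinRuns (qs ++ [lr]) = runsJ qs ++ tiltRun lr := by
  cases qs with
  | nil => simp [joinRuns, runsJ]
  | cons p t =>
      show joinRuns (p :: (t ++ [lr])) = _
      rw [joinRuns]
      rw [List.foldl_append, PySem.List.foldl_append_eq_flatMap (fun q => "#" :: tiltRun q)]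
      simp only [PySem.List.foldl_append_eq_flatMap]
      rw [runsJ]
      simp only [List.flatMap_cons, List.append_assoc, List.flatMap_nil, List.append_nil]
      rw [shift_hash]
      simp [runsJ]

theorem count_snoc (p : List String) (v : String) :
    PySem.List.count (p ++ [v]) "O"
      = PySem.List.count p "O" + (if v = "O" then 1 else 0) := by
  rw [PySem.List.count_eq, PySem.List.count_eq, List.count_append, List.count_singleton]
  simp [beq_iff_eq]

theorem tiltRun_snoc_other (p : List String) (v : String) (hv : v ≠ "O") :
    tiltRun (p ++ [v]) = tiltRun p ++ [v] := by
  have hk := count_le_length p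
  have hc : PySem.List.count (p ++ [v]) "O" = PySem.List.count p "O" := by
    rw [count_snoc]; simp [hv]
  simp only [tiltRun, hc]
  rw [List.drop_append_of_le_length hk]
  simp [hv, List.append_assoc]

theorem tiltRun_snoc_O_full (p : List String) (h : PySem.List.count p "O" = p.length) :
    tiltRun (p ++ ["O"]) = tiltRun p ++ ["O"] := by
  have hc : PySem.List.count (p ++ ["O"]) "O" = p.length + 1 := by
    have h2 := h
    rw [PySem.List.count_eq] at h2
    rw [count_snoc]; simp [h2]
  simp only [tiltRun, hc, h]
  rw [List.drop_eq_nil_of_le (by simp), List.drop_eq_nil_of_le le_rfl]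
  simp [List.replicate_succ']

theorem tiltRun_snoc_O (p : List String) (h : PySem.List.count p "O" < p.length) :
    tiltRun (p ++ ["O"]) = (tiltRun p).set (PySem.List.count p "O") "O" ++ ["."] := by
  have hc : PySem.List.count (p ++ ["O"]) "O" = PySem.List.count p "O" + 1 := by
    rw [count_snoc]; simp
  simp only [tiltRun, hc]
  rw [List.drop_append_of_le_length (by omega)]
  rw [List.set_append_right _ _ (by simp)]
  rw [List.drop_eq_getElem_cons h]
  simp [List.replicate_succ', List.append_assoc]
  have hset : (List.drop (List.count "O" p) (List.map (fun v => if v = "O" then "." else v) p)).set 0 "O"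
      = "O" :: List.drop (List.count "O" p + 1) (List.map (fun v => if v = "O" then "." else v) p) := by
    rw [List.drop_eq_getElem_cons (by simpa using h)]
    simp
  rw [hset]
  simp

theorem split_len (col : List String) :
    ∀ s : List (List String) × List String,
      (runsJ (col.foldl splitStep s).1).length + (col.foldl splitStep s).2.length
        = (runsJ s.1).length + s.2.length + col.length := by
  induction col with
  | nil => intro s; simp
  | cons v t ih =>
      intro s
      rw [List.foldl_cons, ih (splitStep s v)]
      have : (runsJ (splitStep s v).1).length + (splitStep s v).2.length
          = (runsJ s.1).length + s.2.length + 1 := by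
        unfold splitStep
        split_ifs with h
        · simp [runsJ_snoc, tiltRun_length]; omega
        · simp; omega
      simp only [List.length_cons]
      omega

theorem length_writeCol (g : List (List String)) (j : Nat) (c : List String)
    (hc : c.length = g.length) : (writeCol g j c).length = g.length := by
  simp [writeCol, hc]

theorem get2_writeCol (g : List (List String)) (j : Nat) (c : List String)
    (hj : ∀ row ∈ g, j < row.length) (hc : c.length = g.length)
    (i : Nat) (hi : i < g.length) :
    pvGet2 (writeCol g j c) (i : Int) (j : Int) = c.getD i "" := by
  have hi' : i < c.length := by omega
  have hi2 : i < (List.zipWith (fun (row : List String) v => row.set j v) g c).length := by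
    simp; omega
  unfold pvGet2 writeCol
  rw [PySem.List.pyGetD_natCast, PySem.List.pyGetD_natCast]
  rw [List.getD_eq_getElem _ _ hi2]
  rw [List.getElem_zipWith]
  have hjr : j < (g[i]).length := hj _ (List.getElem_mem hi)
  rw [List.getD_eq_getElem _ _ (by simpa using hjr), List.getElem_set_self]
  rw [List.getD_eq_getElem _ _ hi']

theorem set2_writeCol (g : List (List String)) (j : Nat) (c : List String)
    (hj : ∀ row ∈ g, j < row.length) (hc : c.length = g.length)
    (i : Nat) (hi : i < g.length) (v : String) :
    pvSet2 (writeCol g j c) (i : Int) (j : Int) v = writeCol g j (c.set i v) := by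
  have hi' : i < c.length := by omega
  have hi2 : i < (List.zipWith (fun (row : List String) v => row.set j v) g c).length := by
    simp; omega
  unfold pvSet2
  rw [PySem.List.pyGetD_natCast, PySem.List.pySetD_natCast, PySem.List.pySetD_natCast]
  unfold writeCol
  rw [List.getD_eq_getElem _ _ hi2]
  rw [List.getElem_zipWith, List.set_set]
  apply List.ext_getElem
  · simp [hc]
  · intro k hk1 hk2
    by_cases hki : i = k
    · subst hki
      simp [List.getElem_zipWith]
    · simp [List.getElem_zipWith, hki]

theorem writeCol_getColumn (g : List (List String)) (j : Nat) :
    writeCol g j (getColumn j g) = g := by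
  apply List.ext_getElem
  · simp [writeCol, getColumn]
  · intro k hk1 hk2
    simp only [writeCol, getColumn, List.getElem_zipWith, List.getElem_map]
    by_cases hjr : j < (g[k]).length
    · rw [List.getD_eq_getElem _ _ hjr, List.set_getElem_self]
    · rw [List.set_eq_of_length_le (by omega)]

theorem length_getColumn (g : List (List String)) (j : Nat) :
    (getColumn j g).length = g.length := by
  simp [getColumn]

-- loop state of A's forward inner loop after r iterations / run-splitting state of the
-- first r column cells
def pvFoldF (g : List (List String)) (j : Nat) (r : Nat) : List (List String) × Int :=
  (List.range r).foldl (fun (st : List (List String) × Int) (i : Nat) => pvStep false (j : Int) st (i : Int)) (g, 0)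

def splitUpTo (col : List String) (r : Nat) : List (List String) × List String :=
  (col.take r).foldl splitStep ([], [])

theorem pvStep_false_eq (cj : Int) (st : List (List String) × Int) (r : Int) :
    pvStep false cj st r =
      if pvGet2 st.1 r cj = "#" then (st.1, r + 1)
      else if pvGet2 st.1 r cj = "O" ∧ st.2 < (st.1.length : Int) - 1 then
        (pvSet2 (pvSet2 st.1 r cj ".") st.2 cj "O", st.2 + 1)
      else st := by
  unfold pvStep
  simp

theorem pvStep_true_eq (cj : Int) (st : List (List String) × Int) (r : Int) :
    pvStep true cj st r =
      if pvGet2 st.1 ((st.1.length : Int) - 1 - r) cj = "#" then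
        (st.1, (st.1.length : Int) - 1 - r - 1)
      else if pvGet2 st.1 ((st.1.length : Int) - 1 - r) cj = "O" ∧ st.2 > 0 then
        (pvSet2 (pvSet2 st.1 ((st.1.length : Int) - 1 - r) cj ".") st.2 cj "O", st.2 + -1)
      else st := by
  unfold pvStep
  simp

theorem tiltRun_nil : tiltRun ([] : List String) = [] := by
  simp [tiltRun]

theorem count_nil_O : PySem.List.count ([] : List String) "O" = 0 := by
  simp

theorem inner_fwd_aux (g : List (List String)) (j : Nat)
    (hj : ∀ row ∈ g, j < row.length) :
    ∀ r : Nat, r ≤ g.length →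
      ((pvFoldF g j r).1
        = writeCol g j
            (runsJ (splitUpTo (getColumn j g) r).1
              ++ tiltRun (splitUpTo (getColumn j g) r).2
              ++ (getColumn j g).drop r))
      ∧ (r < g.length →
          (pvFoldF g j r).2
            = (r : Int) - ((splitUpTo (getColumn j g) r).2.length : Int)
                + (PySem.List.count (splitUpTo (getColumn j g) r).2 "O" : Int)) := by
  have hcol : (getColumn j g).length = g.length := length_getColumn g j
  have hsplit_unfold : ∀ m, splitUpTo (getColumn j g) m
      = ((getColumn j g).take m).foldl splitStep ([], []) := fun m => rfl
  intro r
  induction r with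
  | zero =>
      intro _
      constructor
      · show (g, (0 : Int)).1 = _
        have h0 : splitUpTo (getColumn j g) 0 = ([], []) := rfl
        rw [h0]
        dsimp only
        have h1 : runsJ [] = [] := rfl
        rw [h1, tiltRun_nil, List.drop_zero, List.nil_append, List.nil_append]
        exact (writeCol_getColumn g j).symm
      · intro _
        have h0 : splitUpTo (getColumn j g) 0 = ([], []) := rfl
        rw [h0]
        show (0 : Int) = _
        rw [count_nil_O]
        simp
  | succ r ih =>
      intro h1
      have hrn : r < g.length := by omega
      have hrc : r < (getColumn j g).length := by omega
      obtain ⟨IH1, IH2⟩ := ih (by omega)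
      have hle := IH2 hrn
      have F1 : (runsJ (splitUpTo (getColumn j g) r).1).length
          + (splitUpTo (getColumn j g) r).2.length = r := by
        have h2 := split_len ((getColumn j g).take r) ([], [])
        rw [← hsplit_unfold r] at h2
        have h3 : runsJ ([] : List (List String)) = [] := rfl
        rw [h3] at h2
        simp only [List.length_nil, List.length_take] at h2
        omega
      have hcnt : PySem.List.count (splitUpTo (getColumn j g) r).2 "O"
          ≤ (splitUpTo (getColumn j g) r).2.length := count_le_length _
      have htl := tiltRun_length (splitUpTo (getColumn j g) r).2
      have hXlen : (runsJ (splitUpTo (getColumn j g) r).1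
          ++ tiltRun (splitUpTo (getColumn j g) r).2 ++ (getColumn j g).drop r).length
          = g.length := by
        simp only [List.length_append, htl, List.length_drop]
        omega
      have hwl := length_writeCol g j _ hXlen
      have hstep : pvFoldF g j (r + 1) = pvStep false (j : Int) (pvFoldF g j r) (r : Int) := by
        simp [pvFoldF, List.range_succ]
      have hpair : pvFoldF g j r
          = (writeCol g j (runsJ (splitUpTo (getColumn j g) r).1
              ++ tiltRun (splitUpTo (getColumn j g) r).2 ++ (getColumn j g).drop r),
             (r : Int) - ((splitUpTo (getColumn j g) r).2.length : Int)
               + (PySem.List.count (splitUpTo (getColumn j g) r).2 "O" : Int)) :=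
        Prod.ext IH1 hle
      have htake : (getColumn j g).take (r + 1)
          = (getColumn j g).take r ++ [(getColumn j g)[r]] := by
        rw [List.take_add_one]
        simp [List.getElem?_eq_getElem hrc]
      have hread : pvGet2 (writeCol g j (runsJ (splitUpTo (getColumn j g) r).1
            ++ tiltRun (splitUpTo (getColumn j g) r).2 ++ (getColumn j g).drop r))
            (r : Int) (j : Int) = (getColumn j g)[r] := by
        rw [get2_writeCol g j _ hj hXlen r hrn]
        rw [List.getD_append_right _ _ _ _ (by simp only [List.length_append]; omega)]
        have h0 : r - (runsJ (splitUpTo (getColumn j g) r).1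
            ++ tiltRun (splitUpTo (getColumn j g) r).2).length = 0 := by
          simp only [List.length_append]; omega
        rw [h0]
        rw [List.getD_eq_getElem _ _ (by simp; omega)]
        simp [List.getElem_drop]
      rw [hstep, hpair, pvStep_false_eq]
      dsimp only
      rw [hread]
      by_cases hH : (getColumn j g)[r] = "#"
      · rw [if_pos hH]
        have hsucc : splitUpTo (getColumn j g) (r + 1)
            = ((splitUpTo (getColumn j g) r).1 ++ [(splitUpTo (getColumn j g) r).2], []) := by
          rw [hsplit_unfold (r + 1), htake, List.foldl_append, ← hsplit_unfold r]
          simp [splitStep, hH]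
        constructor
        · show writeCol g j _ = _
          rw [hsucc]
          dsimp only
          rw [runsJ_snoc, tiltRun_nil]
          rw [List.drop_eq_getElem_cons hrc, hH]
          simp [List.append_assoc]
        · intro _
          rw [hsucc]
          dsimp only
          rw [count_nil_O]
          simp only [List.length_nil]
          omega
      · rw [if_neg hH]
        have hsucc : splitUpTo (getColumn j g) (r + 1)
            = ((splitUpTo (getColumn j g) r).1,
               (splitUpTo (getColumn j g) r).2 ++ [(getColumn j g)[r]]) := by
          rw [hsplit_unfold (r + 1), htake, List.foldl_append, ← hsplit_unfold r]
          simp [splitStep, hH]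
        by_cases hO : (getColumn j g)[r] = "O"
        · by_cases hcond : (r : Int) - ((splitUpTo (getColumn j g) r).2.length : Int)
              + (PySem.List.count (splitUpTo (getColumn j g) r).2 "O" : Int)
              < (g.length : Int) - 1
          · rw [if_pos ⟨hO, by rw [hwl]; exact hcond⟩]
            have hlnat : (r : Int) - ((splitUpTo (getColumn j g) r).2.length : Int)
                + (PySem.List.count (splitUpTo (getColumn j g) r).2 "O" : Int)
                = ((r - (splitUpTo (getColumn j g) r).2.length
                    + PySem.List.count (splitUpTo (getColumn j g) r).2 "O" : Nat) : Int) := by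
              push_cast [Nat.cast_sub (by omega : (splitUpTo (getColumn j g) r).2.length ≤ r)]
              ring
            rw [set2_writeCol g j _ hj hXlen r hrn "."]
            rw [hlnat]
            rw [set2_writeCol g j _ hj (by rw [List.length_set]; exact hXlen) _ (by omega) "O"]
            constructor
            · show writeCol g j _ = _
              rw [hsucc]
              dsimp only
              congr 1
              rw [List.drop_eq_getElem_cons hrc, hO]
              rw [List.set_append_right _ _ (by simp only [List.length_append]; omega)]
              have h2 : r - (runsJ (splitUpTo (getColumn j g) r).1
                  ++ tiltRun (splitUpTo (getColumn j g) r).2).length = 0 := by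
                simp only [List.length_append]; omega
              rw [h2, List.set_cons_zero]
              by_cases hk : PySem.List.count (splitUpTo (getColumn j g) r).2 "O"
                  < (splitUpTo (getColumn j g) r).2.length
              · rw [tiltRun_snoc_O _ hk]
                rw [List.set_append_left _ _ (by simp only [List.length_append]; omega)]
                rw [List.set_append_right _ _ (by omega)]
                have h3 : r - (splitUpTo (getColumn j g) r).2.length
                    + PySem.List.count (splitUpTo (getColumn j g) r).2 "O"
                    - (runsJ (splitUpTo (getColumn j g) r).1).length
                    = PySem.List.count (splitUpTo (getColumn j g) r).2 "O" := by omega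
                rw [h3]
                simp [List.append_assoc]
              · have hkeq : PySem.List.count (splitUpTo (getColumn j g) r).2 "O"
                    = (splitUpTo (getColumn j g) r).2.length := by omega
                rw [tiltRun_snoc_O_full _ hkeq]
                rw [List.set_append_right _ _ (by simp only [List.length_append]; omega)]
                have h4 : r - (splitUpTo (getColumn j g) r).2.length
                    + PySem.List.count (splitUpTo (getColumn j g) r).2 "O"
                    - (runsJ (splitUpTo (getColumn j g) r).1
                        ++ tiltRun (splitUpTo (getColumn j g) r).2).length = 0 := by
                  simp only [List.length_append]; omega
                rw [h4, List.set_cons_zero]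
                simp [List.append_assoc]
            · intro _
              rw [hsucc]
              dsimp only
              rw [count_snoc]
              simp only [List.length_append, List.length_singleton, if_pos hO]
              omega
          · rw [if_neg (by
              intro hand
              exact hcond (by rw [← hwl]; exact hand.2))]
            have hr1 : r = g.length - 1 := by omega
            have hk2 : PySem.List.count (splitUpTo (getColumn j g) r).2 "O"
                = (splitUpTo (getColumn j g) r).2.length := by omega
            constructor
            · show writeCol g j _ = _
              rw [hsucc]
              dsimp only
              congr 1
              rw [List.drop_eq_getElem_cons hrc, hO]
              rw [tiltRun_snoc_O_full _ hk2]
              have hnil : (getColumn j g).drop (r + 1) = [] :=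
                List.drop_eq_nil_of_le (by omega)
              rw [hnil]
              simp [List.append_assoc]
            · intro hlt
              omega
        · rw [if_neg (fun hand => hO hand.1)]
          constructor
          · show writeCol g j _ = _
            rw [hsucc]
            dsimp only
            congr 1
            rw [List.drop_eq_getElem_cons hrc]
            rw [tiltRun_snoc_other _ _ hO]
            simp [List.append_assoc]
          · intro _
            rw [hsucc]
            dsimp only
            rw [count_snoc]
            simp only [List.length_append, List.length_singleton, if_neg hO]
            omega

theorem inner_fwd (g : List (List String)) (j : Nat)
    (hj : ∀ row ∈ g, j < row.length) :
    pvInner false g (j : Int) = writeCol g j (tiltColFwd (getColumn j g)) := by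
  have hcol := length_getColumn g j
  have hP : pvInner false g (j : Int) = (pvFoldF g j g.length).1 := by
    unfold pvInner pvFoldF
    rw [PySem.List.pyRange_zero_nat, List.foldl_map]
    rfl
  rw [hP, (inner_fwd_aux g j hj g.length le_rfl).1]
  congr 1
  have ht : splitUpTo (getColumn j g) g.length = (getColumn j g).foldl splitStep ([], []) := by
    unfold splitUpTo
    rw [← hcol, List.take_length]
  rw [ht, List.drop_eq_nil_of_le (by omega)]
  unfold tiltColFwd splitHash
  rw [joinRuns_snoc]
  simp

theorem tiltColFwd_length (c : List String) : (tiltColFwd c).length = c.length := by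
  unfold tiltColFwd splitHash
  rw [joinRuns_snoc]
  have h := split_len c ([], [])
  have h3 : runsJ ([] : List (List String)) = [] := rfl
  rw [h3] at h
  simp only [List.length_nil] at h
  simp only [List.length_append, tiltRun_length]
  omega

theorem set_reverse {α : Type} (l : List α) (i : Nat) (x : α) (h : i < l.length) :
    (l.set i x).reverse = l.reverse.set (l.length - 1 - i) x := by
  apply List.ext_getElem
  · simp
  · intro k hk1 hk2
    have hk : k < l.length := by simpa using hk1
    rw [List.getElem_reverse]
    simp only [List.getElem_set, List.getElem_reverse, List.length_set]
    split_ifs with h1 h2 h2 <;> first | rfl | omega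

theorem pvStep_length (inverse : Bool) (c : Int) (st : List (List String) × Int) (r : Int) :
    (pvStep inverse c st r).1.length = st.1.length := by
  unfold pvStep pvSet2
  dsimp only
  split_ifs <;> simp [PySem.List.length_pySetD]

theorem pvStep_le_nonneg (c : Int) (st : List (List String) × Int) (r : Nat)
    (h : 0 ≤ st.2) : 0 ≤ (pvStep false c st (r : Int)).2 := by
  unfold pvStep
  dsimp only
  simp only [Bool.not_false, if_true]
  split_ifs <;> (try simp) <;> omega

theorem pyGetD_reverse (a : List (List String)) (r : Nat) (hr : r < a.length) :
    PySem.List.pyGetD a.reverse ((a.length : Int) - 1 - (r : Int)) []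
      = PySem.List.pyGetD a (r : Int) [] := by
  have hidx : (a.length : Int) - 1 - (r : Int) = ((a.length - 1 - r : Nat) : Int) := by omega
  rw [hidx, PySem.List.pyGetD_natCast, PySem.List.pyGetD_natCast]
  rw [List.getD_eq_getElem _ _ (by simp; omega), List.getD_eq_getElem _ _ hr]
  rw [List.getElem_reverse]
  congr 1
  omega

theorem pvGet2_reverse (a : List (List String)) (r : Nat) (hr : r < a.length) (j : Int) :
    pvGet2 a.reverse ((a.length : Int) - 1 - (r : Int)) j = pvGet2 a (r : Int) j := by
  unfold pvGet2
  rw [pyGetD_reverse a r hr]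

theorem pvSet2_reverse (a : List (List String)) (N i : Int) (hN : N = (a.length : Int))
    (h0 : 0 ≤ i) (hi : i < N) (j : Int) (v : String) :
    pvSet2 a.reverse (N - 1 - i) j v = (pvSet2 a i j v).reverse := by
  subst hN
  obtain ⟨n, rfl⟩ := Int.eq_ofNat_of_zero_le h0
  have hn : n < a.length := by omega
  unfold pvSet2
  rw [pyGetD_reverse a n hn]
  have hidx : (a.length : Int) - 1 - (n : Int) = ((a.length - 1 - n : Nat) : Int) := by omega
  rw [hidx, PySem.List.pySetD_natCast, PySem.List.pySetD_natCast]
  rw [set_reverse a n _ hn]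

theorem pvSet2_length (a : List (List String)) (i j : Int) (v : String) :
    (pvSet2 a i j v).length = a.length := by
  unfold pvSet2
  simp [PySem.List.length_pySetD]

theorem pvStep_rev (j : Int) (r : Nat) (a : List (List String)) (lef : Int)
    (hr : r < a.length) (hle : 0 ≤ lef) :
    pvStep true j (a.reverse, (a.length : Int) - 1 - lef) (r : Int)
      = ((pvStep false j (a, lef) (r : Int)).1.reverse,
         (a.length : Int) - 1 - (pvStep false j (a, lef) (r : Int)).2) := by
  rw [pvStep_true_eq, pvStep_false_eq]
  dsimp only
  simp only [List.length_reverse]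
  rw [pvGet2_reverse a r hr j]
  by_cases hH : pvGet2 a (r : Int) j = "#"
  · rw [if_pos hH, if_pos hH]
    exact Prod.ext rfl (by dsimp only; ring)
  · rw [if_neg hH, if_neg hH]
    by_cases hO : pvGet2 a (r : Int) j = "O"
    · by_cases hc : lef < (a.length : Int) - 1
      · rw [if_pos ⟨hO, by omega⟩, if_pos ⟨hO, hc⟩]
        dsimp only
        apply Prod.ext
        · dsimp only
          rw [pvSet2_reverse a (a.length : Int) (r : Int) rfl (by omega) (by omega) j "."]
          have hlen2 : ((pvSet2 a (r : Int) j ".").length : Int) = (a.length : Int) := by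
            rw [pvSet2_length]
          rw [← hlen2]
          rw [pvSet2_reverse _ _ lef rfl hle (by rw [hlen2]; omega) j "O"]
        · dsimp only
          ring
      · rw [if_neg (by intro hand; omega), if_neg (fun hand => hc hand.2)]
    · rw [if_neg (fun hand => hO hand.1), if_neg (fun hand => hO hand.1)]

theorem fold_rev_aux (j : Int) (rs : List Nat) :
    ∀ (a : List (List String)) (lef : Int),
      (∀ x ∈ rs, x < a.length) → 0 ≤ lef →
      rs.foldl (fun (st : List (List String) × Int) (k : Nat) => pvStep true j st (k : Int))
          (a.reverse, (a.length : Int) - 1 - lef)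
        = ((rs.foldl (fun (st : List (List String) × Int) (k : Nat) => pvStep false j st (k : Int)) (a, lef)).1.reverse,
           (a.length : Int) - 1
             - (rs.foldl (fun (st : List (List String) × Int) (k : Nat) => pvStep false j st (k : Int)) (a, lef)).2) := by
  induction rs with
  | nil => intro a lef _ _; rfl
  | cons x t ih =>
      intro a lef hmem hle
      rw [List.foldl_cons, List.foldl_cons]
      rw [pvStep_rev j x a lef (hmem x List.mem_cons_self) hle]
      have hlen : (pvStep false j (a, lef) (x : Int)).1.length = a.length :=
        pvStep_length false j (a, lef) (x : Int)
      have hnn : 0 ≤ (pvStep false j (a, lef) (x : Int)).2 :=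
        pvStep_le_nonneg j (a, lef) x hle
      have h := ih (pvStep false j (a, lef) (x : Int)).1 (pvStep false j (a, lef) (x : Int)).2
        (fun y hy => by rw [hlen]; exact hmem y (List.mem_cons_of_mem _ hy)) hnn
      rw [hlen, Prod.mk.eta] at h
      exact h

theorem inner_inv (g : List (List String)) (j : Nat) :
    pvInner true g (j : Int) = (pvInner false g.reverse (j : Int)).reverse := by
  have key := fold_rev_aux (j : Int) (List.range g.length) g.reverse 0
    (fun x hx => by simp only [List.mem_range] at hx; simpa using hx) le_rfl
  simp only [List.reverse_reverse, List.length_reverse, sub_zero] at key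
  unfold pvInner
  simp only [Bool.not_true, Bool.not_false, if_true, if_false, Bool.false_eq_true,
    List.length_reverse]
  rw [PySem.List.pyRange_zero_nat, List.foldl_map, List.foldl_map]
  rw [key]

theorem reverse_zipWith {α β γ : Type} (f : α → β → γ) (l₁ : List α) (l₂ : List β)
    (h : l₁.length = l₂.length) :
    (List.zipWith f l₁ l₂).reverse = List.zipWith f l₁.reverse l₂.reverse := by
  apply List.ext_getElem
  · simp [h]
  · intro k hk1 hk2
    have hk : k < l₁.length := by simp at hk1; omega
    rw [List.getElem_reverse]
    rw [List.getElem_zipWith, List.getElem_zipWith]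
    rw [List.getElem_reverse, List.getElem_reverse]
    congr 2 <;> simp <;> omega

theorem inner_eq (inverse : Bool) (g : List (List String)) (j : Nat)
    (hj : ∀ row ∈ g, j < row.length) :
    pvInner inverse g (j : Int) = writeCol g j (tiltCol (getColumn j g) inverse) := by
  cases inverse with
  | false =>
      rw [inner_fwd g j hj]
      simp [tiltCol]
  | true =>
      rw [inner_inv g j]
      rw [inner_fwd g.reverse j (fun row hrow => hj row (List.mem_reverse.mp hrow))]
      have h1 : getColumn j g.reverse = (getColumn j g).reverse := by
        simp [getColumn]
      rw [h1]
      have h2 : (writeCol g.reverse j (tiltColFwd (getColumn j g).reverse)).reverse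
          = writeCol g j (tiltColFwd (getColumn j g).reverse).reverse := by
        unfold writeCol
        rw [reverse_zipWith _ _ _ (by
          simp [tiltColFwd_length, length_getColumn])]
        rw [List.reverse_reverse]
      rw [h2]
      simp [tiltCol]

theorem length_mem_writeCol (g : List (List String)) (j : Nat) (c : List String)
    (row' : List String) (h : row' ∈ writeCol g j c) :
    ∃ row ∈ g, row'.length = row.length := by
  induction g generalizing c with
  | nil => simp [writeCol] at h
  | cons row g' ih =>
      cases c with
      | nil => simp [writeCol] at h
      | cons v c' =>
          simp only [writeCol, List.zipWith_cons_cons, List.mem_cons] at h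
          rcases h with h | h
          · exact ⟨row, List.mem_cons_self, by simp [h]⟩
          · rcases ih c' h with ⟨row0, hm, hl⟩
            exact ⟨row0, List.mem_cons_of_mem _ hm, hl⟩

theorem outer_aux (inverse : Bool) (js : List Nat) :
    ∀ g : List (List String), (∀ row ∈ g, ∀ jx ∈ js, jx < row.length) →
      js.foldl (fun (gg : List (List String)) (jn : Nat) => pvInner inverse gg (jn : Int)) g
        = js.foldl (fun gg jn => writeCol gg jn (tiltCol (getColumn jn gg) inverse)) g := by
  induction js with
  | nil => intro g _; rfl
  | cons x t ih =>
      intro g hg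
      rw [List.foldl_cons, List.foldl_cons]
      rw [inner_eq inverse g x (fun row hrow => hg row hrow x List.mem_cons_self)]
      apply ih
      intro row hrow jx hjx
      obtain ⟨row0, hm, hl⟩ := length_mem_writeCol g x _ row hrow
      rw [hl]
      exact hg row0 hm jx (List.mem_cons_of_mem _ hjx)

-- ===== VERDICT (by name: the statement is the Claim_ definition above) =====
theorem transformY_spec : Claim_equal_transformY := by
  intro rows inverse hdom hpre
  obtain ⟨hne, hlen⟩ := hpre
  show transformY rows inverse = transformY_alt rows inverse
  cases rows with
  | nil => exact absurd rfl hne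
  | cons r0 rest =>
      simp only [List.headD_cons] at hlen ⊢
      unfold transformY transformY_alt
      rw [PySem.List.pyGetD_zero_cons]
      simp only [List.headD_cons]
      rw [PySem.List.pyRange_zero_nat, List.foldl_map]
      exact outer_aux inverse (List.range r0.length) (r0 :: rest)
        (fun row hrow jx hjx => by
          have h1 := hlen row hrow
          simp only [List.mem_range] at hjx
          omega)
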